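-- pv_equiv track=rewrite | github.com/vmalepati1/SolarGenie | osm_test.py | tiletoquadkey
-- ===== SOURCE A (Python) =====
-- def tiletoquadkey(xi, yi, z):
--     quadKey = ''
--     for i in range(z, 0, -1):
--         digit = 0
--         mask = 1 << (i - 1)
--         if(xi & mask) != 0:
--             digit += 1
--         if(yi & mask) != 0:
--             digit += 2
--         quadKey += str(digit)
--     return quadKey
-- ===== SOURCE B (Python) =====
-- def tiletoquadkey(xi, yi, z):
--     if z <= 0:
--         return ''
--     m = (1 << z) - 1
--     xb = format(xi & m, '0{}b'.format(z))
--     yb = format(yi & m, '0{}b'.format(z))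
--     return ''.join(str(2 * (b == '1') + (a == '1')) for a, b in zip(xb, yb))
-- ===== Notes on version B (the rewrite author's own statement) =====
-- stated objective: faster
-- what changed: Replaces the per-bit loop, which builds a fresh z-bit mask and does two big-int ANDs plus a string append each iteration, by two precomputed z-wide masked binary strings (format) and a single join over their zipped characters.
import Mathlib
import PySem

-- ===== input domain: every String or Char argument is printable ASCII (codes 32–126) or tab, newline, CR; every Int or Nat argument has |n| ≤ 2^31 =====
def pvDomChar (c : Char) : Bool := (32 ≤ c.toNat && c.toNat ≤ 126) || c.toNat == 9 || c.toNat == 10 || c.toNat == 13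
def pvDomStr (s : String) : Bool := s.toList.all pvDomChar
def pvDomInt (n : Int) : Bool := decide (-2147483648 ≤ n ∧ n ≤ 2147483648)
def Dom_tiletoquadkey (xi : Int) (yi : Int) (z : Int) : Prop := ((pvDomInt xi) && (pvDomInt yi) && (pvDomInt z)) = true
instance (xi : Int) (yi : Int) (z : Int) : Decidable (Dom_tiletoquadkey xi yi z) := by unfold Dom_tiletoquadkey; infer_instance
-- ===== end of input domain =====

-- B replaces A's per-bit loop (fresh z-bit mask and two big-int ANDs per iteration) by two
-- precomputed z-wide masked binary strings and one pass over their zipped characters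
-- (objective: faster; a timing run measured B faster at the largest size).

-- ===== PORT A =====
def tiletoquadkey (xi : Int) (yi : Int) (z : Int) : String :=
  String.ofList ((PySem.List.pyRange z 0 (-1)).foldl (fun quadKey i =>
    let digit : Int := 0
    -- 1 << (i - 1): inside the loop i ≥ 1, so the shift amount i - 1 is the Nat (i-1).toNat
    let mask : Int := 1 <<< (i - 1).toNat
    let digit := if PySem.Int.band xi mask ≠ 0 then digit + 1 else digit
    let digit := if PySem.Int.band yi mask ≠ 0 then digit + 2 else digit
    quadKey ++ PySem.Int.toChars digit) [])

-- ===== PORT B =====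
-- format(n, '0{w}b') for 0 ≤ n < 2^w: the w binary digits of n, most significant first.
-- Exact on that domain, which holds at both call sites (n = x & ((1 << w) - 1)).
def pvFormatBin0 (n : Int) (w : Nat) : List Char :=
  (List.range w).reverse.map (fun j => if n.toNat.testBit j then '1' else '0')

def tiletoquadkey_alt (xi : Int) (yi : Int) (z : Int) : String :=
  if z ≤ 0 then "" else
    let m : Int := (1 <<< z.toNat) - 1
    let xb := pvFormatBin0 (PySem.Int.band xi m) z.toNat
    let yb := pvFormatBin0 (PySem.Int.band yi m) z.toNat
    String.ofList (((xb.zip yb).map (fun p =>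
      PySem.Int.toChars (2 * (if p.2 = '1' then (1:Int) else 0) + (if p.1 = '1' then 1 else 0)))).flatten)

-- ===== PRECONDITION & SPEC =====
def Spec_tiletoquadkey (xi : Int) (yi : Int) (z : Int) (out : String) : Prop := out = tiletoquadkey_alt xi yi z
instance (xi : Int) (yi : Int) (z : Int) (out : String) : Decidable (Spec_tiletoquadkey xi yi z out) := by unfold Spec_tiletoquadkey; infer_instance

-- ===== CLAIM (what is proved, stated in full; the proofs are below) =====
def Claim_equal_tiletoquadkey : Prop := ∀ (xi : Int) (yi : Int) (z : Int), Dom_tiletoquadkey xi yi z → Spec_tiletoquadkey xi yi z (tiletoquadkey xi yi z)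

-- ===== LEMMAS AND PROOFS =====

-- The bit Python's 'x & (1 << j)' tests: bit j of x, two's complement on negatives.
def pvBitOf (x : Int) (j : Nat) : Bool :=
  if 0 ≤ x then x.toNat.testBit j else !((-x - 1).toNat.testBit j)

theorem pvBandTwoPow (x : Int) (j : Nat) :
    (PySem.Int.band x (((2^j : Nat)) : Int) ≠ 0) ↔ pvBitOf x j = true := by
  by_cases hx : 0 ≤ x
  · rw [PySem.Int.band_of_nonneg hx (by positivity), Int.toNat_natCast, Nat.and_two_pow]
    unfold pvBitOf
    rw [if_pos hx]
    cases h : x.toNat.testBit j <;> simp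
  · have hmask : (0:Int) ≤ ((2^j : Nat) : Int) := by positivity
    rw [PySem.Int.band.eq_1, if_neg hx, if_pos hmask, Int.toNat_natCast,
        Nat.land_comm, Nat.and_two_pow]
    unfold pvBitOf
    rw [if_neg hx]
    have hp : (0:Nat) < 2^j := Nat.two_pow_pos j
    cases h : (-x - 1).toNat.testBit j <;> simp

theorem pvCompl (w : Nat) : ∀ r : Nat, r < 2^w → 2^w - 1 - r = (2^w - 1) ^^^ r := by
  induction w with
  | zero => intro r h; interval_cases r; rfl
  | succ w ih =>
    intro r h
    have h2 : 2^(w+1) = 2*2^w := by ring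
    have hq : r / 2 < 2^w := by omega
    have ihq := ih (r/2) hq
    have hb1 : 2^(w+1) - 1 = Nat.bit true (2^w - 1) := by
      rw [Nat.bit_val]; simp; omega
    have hb2 : r = Nat.bit (decide (r % 2 = 1)) (r / 2) := by
      rw [Nat.bit_val]
      rcases Nat.mod_two_eq_zero_or_one r with h'|h' <;> simp [h'] <;> omega
    rw [hb1, hb2, Nat.xor_bit, Nat.bit_val, ← ihq, Nat.bit_val] at *
    rcases Nat.mod_two_eq_zero_or_one r with h'|h' <;> simp [h'] at * <;> omega

theorem pvBandMask (x : Int) (w j : Nat) (hj : j < w) :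
    (PySem.Int.band x (((2^w - 1 : Nat)) : Int)).toNat.testBit j = pvBitOf x j := by
  by_cases hx : 0 ≤ x
  · rw [PySem.Int.band_of_nonneg hx (by positivity), Int.toNat_natCast, Int.toNat_natCast]
    unfold pvBitOf
    rw [if_pos hx, Nat.testBit_land, Nat.testBit_two_pow_sub_one]
    simp [hj]
  · have hmask : (0:Int) ≤ ((2^w - 1 : Nat) : Int) := by positivity
    rw [PySem.Int.band.eq_1, if_neg hx, if_pos hmask, Int.toNat_natCast, Int.toNat_natCast,
        Nat.land_comm, Nat.and_two_pow_sub_one_eq_mod]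
    unfold pvBitOf
    rw [if_neg hx]
    have hr : (-x - 1).toNat % 2^w < 2^w := Nat.mod_lt _ (Nat.two_pow_pos w)
    rw [pvCompl w _ hr, Nat.testBit_xor, Nat.testBit_two_pow_sub_one, Nat.testBit_mod_two_pow]
    simp [hj]

theorem pvReverseRange (w : Nat) :
    (List.range w).reverse = (List.range w).map (fun k => w - 1 - k) := by
  apply List.ext_getElem (by simp)
  intro i h1 h2
  simp [List.getElem_reverse]

theorem pvRangeNil (z : Int) (hz : z ≤ 0) : PySem.List.pyRange z 0 (-1) = [] := by
  unfold PySem.List.pyRange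
  rw [if_neg (by decide), if_neg (by decide), if_neg (by omega)]
  rfl

theorem pvRangeDesc (z : Int) (hz : 0 < z) :
    PySem.List.pyRange z 0 (-1) = (List.range z.toNat).map (fun (k : Nat) => z - (k:Int)) := by
  unfold PySem.List.pyRange
  rw [if_neg (by decide), if_neg (by decide), if_pos (by omega)]
  have : ((z - 0 + - -1 - 1) / - -1).toNat = z.toNat := by
    norm_num
  rw [this]
  show List.map (fun (k : Nat) => z + -1 * (k:Int)) (List.range z.toNat) = _
  exact List.map_congr_left (by intro k _; omega)

theorem pvPointwise (xi yi z : Int) (k : Nat) (hz : 0 < z) (hk : k < z.toNat) :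
    PySem.Int.toChars
      ((if PySem.Int.band yi (1 <<< ((z - (k:Int)) - 1).toNat) ≠ 0 then
          (if PySem.Int.band xi (1 <<< ((z - (k:Int)) - 1).toNat) ≠ 0 then (0:Int) + 1 else 0) + 2
        else
          (if PySem.Int.band xi (1 <<< ((z - (k:Int)) - 1).toNat) ≠ 0 then (0:Int) + 1 else 0))) =
    PySem.Int.toChars
      (2 * (if (if (PySem.Int.band yi ((2^z.toNat - 1 : Nat) : Int)).toNat.testBit (z.toNat - 1 - k) then '1' else '0') = '1' then (1:Int) else 0)
         + (if (if (PySem.Int.band xi ((2^z.toNat - 1 : Nat) : Int)).toNat.testBit (z.toNat - 1 - k) then '1' else '0') = '1' then (1:Int) else 0)) := by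
  have hj : ((z - (k:Int)) - 1).toNat = z.toNat - 1 - k := by omega
  have hjw : z.toNat - 1 - k < z.toNat := by omega
  simp only [hj, Nat.one_shiftLeft]
  rw [pvBandMask xi _ _ hjw, pvBandMask yi _ _ hjw]
  simp only [pvBandTwoPow xi (z.toNat - 1 - k), pvBandTwoPow yi (z.toNat - 1 - k)]
  rcases Bool.dichotomy (pvBitOf xi (z.toNat - 1 - k)) with hx|hx <;>
    rcases Bool.dichotomy (pvBitOf yi (z.toNat - 1 - k)) with hy|hy <;>
      simp [hx, hy]

theorem tiletoquadkey_eq (xi yi z : Int) : tiletoquadkey xi yi z = tiletoquadkey_alt xi yi z := by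
  by_cases hz : z ≤ 0
  · rw [tiletoquadkey, tiletoquadkey_alt, pvRangeNil z hz, if_pos hz]
    rfl
  · have hz' : 0 < z := by omega
    rw [tiletoquadkey, tiletoquadkey_alt, if_neg hz, pvRangeDesc z hz']
    have hm : ((1 <<< z.toNat : Nat) : Int) - 1 = ((2^z.toNat - 1 : Nat) : Int) := by
      rw [Nat.one_shiftLeft]
      have : 1 ≤ 2^z.toNat := Nat.one_le_two_pow
      omega
    show String.ofList
        (List.foldl (fun quadKey (i : Int) => quadKey ++ PySem.Int.toChars
            (if PySem.Int.band yi ((1 <<< (i - 1).toNat : Nat) : Int) ≠ 0 then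
              (if PySem.Int.band xi ((1 <<< (i - 1).toNat : Nat) : Int) ≠ 0 then (0:Int) + 1 else 0) + 2
            else
              (if PySem.Int.band xi ((1 <<< (i - 1).toNat : Nat) : Int) ≠ 0 then (0:Int) + 1 else 0)))
          [] (List.map (fun (k : Nat) => z - (k:Int)) (List.range z.toNat))) =
      String.ofList
        (List.map (fun p => PySem.Int.toChars ((2 * if p.2 = '1' then (1:Int) else 0) + if p.1 = '1' then 1 else 0))
            ((pvFormatBin0 (PySem.Int.band xi (((1 <<< z.toNat : Nat) : Int) - 1)) z.toNat).zip
             (pvFormatBin0 (PySem.Int.band yi (((1 <<< z.toNat : Nat) : Int) - 1)) z.toNat))).flatten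
    rw [hm, List.foldl_map, PySem.List.foldl_append_eq_flatMap]
    unfold pvFormatBin0
    rw [pvReverseRange, List.map_map, List.map_map, List.zip_map', List.map_map, List.nil_append]
    congr 1
    rw [List.flatMap_def]
    congr 1
    apply List.map_congr_left
    intro k hk
    rw [List.mem_range] at hk
    exact pvPointwise xi yi z k hz' hk

-- ===== VERDICT (by name: the statement is the Claim_ definition above) =====
theorem tiletoquadkey_spec : Claim_equal_tiletoquadkey := by
  intro xi yi z _
  exact tiletoquadkey_eq xi yi z
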